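-- pv_equiv track=rewrite | github.com/SEMOSS/Semoss | py/pdf_util.py | fill_header
-- ===== SOURCE A (Python) =====
-- def fill_header(input_list):
--   count = 0
--   output_list = []
--   for item in input_list:
--     if len(item) == 0:
--       output_list.append(f"H{count}")
--       count = count +1
--     else:
--       output_list.append(item)
--   return output_list
-- ===== SOURCE B (Python) =====
-- def fill_header(input_list):
--     # Split the list into segments at the empty items (empties act as separators),
--     # then rejoin the segments with numbered headers "H0", "H1", ... in between.
--     segs = []
--     cur = []
--     for item in input_list:
--         if len(item) == 0:
--             segs.append(cur)
--             cur = []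
--         else:
--             cur.append(item)
--     segs.append(cur)
--     out = segs[0]
--     for n, seg in enumerate(segs[1:]):
--         out.append(f"H{n}")
--         out.extend(seg)
--     return out
-- ===== Notes on version B (the rewrite author's own statement) =====
-- stated objective: alternative
-- what changed: Instead of one interleaved count-and-append pass, B treats empty items as separators: it splits the list into segments at the empties, then rejoins the segments with numbered headers H0, H1, ... in between.
import Mathlib
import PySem

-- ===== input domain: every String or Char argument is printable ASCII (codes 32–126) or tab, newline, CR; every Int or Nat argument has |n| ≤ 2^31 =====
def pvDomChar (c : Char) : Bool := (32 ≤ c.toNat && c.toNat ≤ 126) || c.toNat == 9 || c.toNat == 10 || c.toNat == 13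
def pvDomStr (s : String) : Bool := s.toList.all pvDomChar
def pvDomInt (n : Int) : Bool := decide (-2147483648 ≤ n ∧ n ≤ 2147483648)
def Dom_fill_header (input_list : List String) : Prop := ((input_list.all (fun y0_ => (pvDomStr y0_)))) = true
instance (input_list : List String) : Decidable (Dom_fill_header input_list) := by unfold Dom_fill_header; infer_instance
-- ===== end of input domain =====

-- B splits the list into segments at the empty items and rejoins the segments with
-- numbered headers in between (alternative decomposition, same cost as A).

-- ===== PORT A =====
-- one pass: state (count, output_list); empty items append "H{count}" and bump count
def fill_header (input_list : List String) : List String :=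
  (input_list.foldl
    (fun (st : Int × List String) item =>
      if PySem.Str.len item == 0 then
        (st.1 + 1, st.2 ++ ["H" ++ PySem.Int.toStr st.1])
      else
        (st.1, st.2 ++ [item]))
    ((0 : Int), ([] : List String))).2

-- ===== PORT B =====
-- pass 1: split into segments at the empties (state (segs, cur));
-- pass 2: rejoin segs[0], then for each later segment a numbered header followed by the segment
def fill_header_alt (input_list : List String) : List String :=
  let st :=
    input_list.foldl
      (fun (st : List (List String) × List String) item =>
        if PySem.Str.len item == 0 then (st.1 ++ [st.2], ([] : List String))
        else (st.1, st.2 ++ [item]))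
      (([] : List (List String)), ([] : List String))
  let segs := st.1 ++ [st.2]
  match segs with
  | [] => []   -- unreachable: segs ends with [st.2]
  | s0 :: rest =>
      (PySem.List.enumerate rest).foldl
        (fun out p => (out ++ ["H" ++ PySem.Int.toStr p.1]) ++ p.2) s0

-- ===== PRECONDITION & SPEC =====
def Spec_fill_header (input_list : List String) (out : List String) : Prop := out = fill_header_alt input_list
instance (input_list : List String) (out : List String) : Decidable (Spec_fill_header input_list out) := by unfold Spec_fill_header; infer_instance

-- ===== CLAIM (what is proved, stated in full; the proofs are below) =====
def Claim_equal_fill_header : Prop := ∀ (input_list : List String), Dom_fill_header input_list → Spec_fill_header input_list (fill_header input_list)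

-- ===== LEMMAS AND PROOFS =====

-- reference form: the headed list with the counter starting at c
def pvCore (c : Int) : List String → List String
  | [] => []
  | x :: xs =>
    if PySem.Str.len x == 0 then ("H" ++ PySem.Int.toStr c) :: pvCore (c + 1) xs
    else x :: pvCore c xs

theorem pvA_foldl (l : List String) : ∀ (c : Int) (acc : List String),
    (l.foldl
      (fun (st : Int × List String) item =>
        if PySem.Str.len item == 0 then
          (st.1 + 1, st.2 ++ ["H" ++ PySem.Int.toStr st.1])
        else
          (st.1, st.2 ++ [item]))
      (c, acc)).2 = acc ++ pvCore c l := by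
  induction l with
  | nil => intro c acc; simp [pvCore]
  | cons x xs ih =>
    intro c acc
    by_cases h : (PySem.Str.len x == 0) = true
    · rw [List.foldl_cons, if_pos h, ih]
      simp only [pvCore, h, if_true, List.append_assoc, List.singleton_append]
    · rw [List.foldl_cons, if_neg h, ih]
      simp only [pvCore, h, Bool.false_eq_true, if_false, List.append_assoc, List.singleton_append]

-- segments of the remaining list, given the current partial segment
def pvSplit (cur : List String) : List String → List (List String)
  | [] => [cur]
  | x :: xs =>
    if PySem.Str.len x == 0 then cur :: pvSplit [] xs
    else pvSplit (cur ++ [x]) xs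

theorem pvSplit_ne_nil (l : List String) : ∀ cur, pvSplit cur l ≠ [] := by
  induction l with
  | nil => intro cur; simp [pvSplit]
  | cons x xs ih =>
    intro cur
    by_cases h : (PySem.Str.len x == 0) = true
    · simp only [pvSplit, h, if_true]; simp
    · simp only [pvSplit, h, Bool.false_eq_true, if_false]; exact ih _

-- B's first fold computes pvSplit
theorem pvSplit_foldl (l : List String) : ∀ (acc : List (List String)) (cur : List String),
    (let st := l.foldl
      (fun (st : List (List String) × List String) item =>
        if PySem.Str.len item == 0 then (st.1 ++ [st.2], ([] : List String))
        else (st.1, st.2 ++ [item]))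
      (acc, cur)
     st.1 ++ [st.2]) = acc ++ pvSplit cur l := by
  induction l with
  | nil => intro acc cur; simp [pvSplit]
  | cons x xs ih =>
    intro acc cur
    by_cases h : (PySem.Str.len x == 0) = true
    · simp only [List.foldl_cons, h, if_true, pvSplit]
      rw [ih]; simp
    · simp only [List.foldl_cons, h, Bool.false_eq_true, if_false, pvSplit]
      rw [ih]

-- the rejoined value: first segment, then header + segment for each later one
def pvFlat (c : Int) : List (List String) → List String
  | [] => []
  | s :: ss => ("H" ++ PySem.Int.toStr c) :: (s ++ pvFlat (c + 1) ss)

def pvJoin (c : Int) : List (List String) → List String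
  | [] => []
  | s :: ss => s ++ pvFlat c ss

-- B's second fold computes pvFlat
theorem pvFlat_foldl (rest : List (List String)) : ∀ (c : Int) (out : List String),
    (PySem.List.enumerate rest c).foldl
      (fun out p => (out ++ ["H" ++ PySem.Int.toStr p.1]) ++ p.2) out
    = out ++ pvFlat c rest := by
  induction rest with
  | nil => intro c out; simp [PySem.List.enumerate_nil, pvFlat]
  | cons s ss ih =>
    intro c out
    rw [PySem.List.enumerate_cons, List.foldl_cons, ih]
    simp [pvFlat]

-- rejoining the split is the headed list
theorem pvJoin_pvSplit (l : List String) : ∀ (c : Int) (cur : List String),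
    pvJoin c (pvSplit cur l) = cur ++ pvCore c l := by
  induction l with
  | nil => intro c cur; simp [pvSplit, pvJoin, pvFlat, pvCore]
  | cons x xs ih =>
    intro c cur
    by_cases h : (PySem.Str.len x == 0) = true
    · simp only [pvSplit, h, if_true, pvJoin, pvCore]
      cases hs : pvSplit ([] : List String) xs with
      | nil => exact absurd hs (pvSplit_ne_nil xs [])
      | cons s0 ss =>
        have hj : pvJoin (c+1) (s0 :: ss) = pvCore (c+1) xs := by
          rw [← hs]; simpa using ih (c+1) []
        simp only [pvJoin] at hj
        simp [pvFlat, hj]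
    · simp only [pvSplit, h, Bool.false_eq_true, if_false, pvCore]
      rw [ih]
      simp

-- ===== VERDICT (by name: the statement is the Claim_ definition above) =====
theorem fill_header_spec : Claim_equal_fill_header := by
  intro l _
  show fill_header l = fill_header_alt l
  unfold fill_header fill_header_alt
  rw [pvA_foldl l 0 []]
  have hsegs := pvSplit_foldl l [] []
  simp only [List.nil_append] at hsegs
  simp only [hsegs]
  cases hs : pvSplit ([] : List String) l with
  | nil => exact absurd hs (pvSplit_ne_nil l [])
  | cons s0 ss =>
    simp only []
    rw [pvFlat_foldl ss 0 s0]
    have := pvJoin_pvSplit l 0 []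
    rw [hs] at this
    simp only [pvJoin, List.nil_append] at this
    simpa using this.symm
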